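-- pv_equiv track=rewrite | github.com/Soft-CPS-Research-Group/opeva_backend_api_training | app/utils/citylearn_dataset.py | _select_building_collections
-- ===== SOURCE A (Python) =====
-- def _select_building_collections(collection_names: list[str], building_ids: list[str]) -> tuple[dict[str, str], list[str]]:
--     mapping: dict[str, str] = {}
--     warnings: list[str] = []
--
--     for building_id in building_ids:
--         prefix = f"building_{building_id}"
--         candidates = sorted([name for name in collection_names if name.startswith(prefix)])
--         if not candidates:
--             warnings.append(f"Building '{building_id}' skipped: no matching Mongo collection with prefix '{prefix}'.")
--             continue
--         exact_name = f"building_{building_id}"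
--         mapping[building_id] = exact_name if exact_name in candidates else candidates[0]
--
--     return mapping, warnings
-- ===== SOURCE B (Python) =====
-- from bisect import bisect_left
--
--
-- def _select_building_collections(collection_names: list[str], building_ids: list[str]) -> tuple[dict[str, str], list[str]]:
--     sorted_names = sorted(collection_names)
--     name_set = set(collection_names)
--     mapping: dict[str, str] = {}
--     warnings: list[str] = []
--
--     for building_id in building_ids:
--         prefix = f"building_{building_id}"
--         if prefix in name_set:
--             mapping[building_id] = prefix
--             continue
--         i = bisect_left(sorted_names, prefix)
--         if i < len(sorted_names) and sorted_names[i].startswith(prefix):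
--             mapping[building_id] = sorted_names[i]
--         else:
--             warnings.append(f"Building '{building_id}' skipped: no matching Mongo collection with prefix '{prefix}'.")
--
--     return mapping, warnings
-- ===== Notes on version B (the rewrite author's own statement) =====
-- stated objective: faster
-- what changed: Instead of filtering and sorting the candidate list for every building id, B sorts collection_names once and builds a set once; each id is then resolved by an O(1) exact-name set lookup or a single bisect_left binary search on the sorted list (the first element >= prefix is the smallest matching candidate).
import Mathlib
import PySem

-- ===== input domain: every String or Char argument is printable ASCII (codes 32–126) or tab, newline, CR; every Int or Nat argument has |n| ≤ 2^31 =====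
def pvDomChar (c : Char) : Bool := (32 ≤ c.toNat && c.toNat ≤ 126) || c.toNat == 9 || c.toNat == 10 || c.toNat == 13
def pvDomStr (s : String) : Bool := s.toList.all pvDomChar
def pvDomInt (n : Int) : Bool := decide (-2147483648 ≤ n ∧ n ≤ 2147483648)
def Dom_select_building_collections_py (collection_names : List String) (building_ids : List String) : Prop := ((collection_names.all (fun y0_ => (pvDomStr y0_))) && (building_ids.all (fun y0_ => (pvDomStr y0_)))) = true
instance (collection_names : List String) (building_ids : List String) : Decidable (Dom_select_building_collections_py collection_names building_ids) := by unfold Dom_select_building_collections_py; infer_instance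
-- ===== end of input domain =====

-- B sorts collection_names once and builds a set once, then resolves each building id by an
-- exact set lookup or one binary search (bisect_left) on the sorted list, instead of A's
-- per-id filter-and-sort of the candidates; objective: faster.


-- the skip message (the same f-string in both Pythons)
def pvMsg (building_id pfx : String) : String :=
  "Building '" ++ building_id ++ "' skipped: no matching Mongo collection with prefix '" ++ pfx ++ "'."

-- ===== PORT A =====
-- loop body of A: filter collection_names by the prefix, sort the candidates, pick exact or first
def pvStepA (collection_names : List String) (st : PySem.Dict String String × List String)
    (building_id : String) : PySem.Dict String String × List String :=
  let pfx := "building_" ++ building_id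
  let candidates := PySem.List.sorted (collection_names.filter (fun name => PySem.Str.startswith name pfx)) (fun x => x) false
  match candidates with
  | [] => (st.1, st.2 ++ [pvMsg building_id pfx])
  | c0 :: _ =>
    let exact_name := "building_" ++ building_id
    (st.1.insert building_id (if candidates.contains exact_name then exact_name else c0), st.2)

def select_building_collections_py (collection_names : List String) (building_ids : List String) : (List (String × String)) × List String :=
  let r := building_ids.foldl (pvStepA collection_names) (PySem.Dict.empty, [])
  (r.1.items, r.2)

-- ===== PORT B =====
-- loop body of B: exact lookup in the prebuilt set, else one bisect_left on the presorted list
def pvStepB (sorted_names : List String) (name_set : PySem.Set String)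
    (st : PySem.Dict String String × List String) (building_id : String) :
    PySem.Dict String String × List String :=
  let pfx := "building_" ++ building_id
  if PySem.Set.contains name_set pfx then
    (st.1.insert building_id pfx, st.2)
  else
    let i := PySem.List.bisectLeft sorted_names pfx
    match sorted_names[i]? with      -- 'i < len(sorted_names)' guard of B
    | some c =>
      if PySem.Str.startswith c pfx then (st.1.insert building_id c, st.2)
      else (st.1, st.2 ++ [pvMsg building_id pfx])
    | none => (st.1, st.2 ++ [pvMsg building_id pfx])

def select_building_collections_py_alt (collection_names : List String) (building_ids : List String) : (List (String × String)) × List String :=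
  let sorted_names := PySem.List.sorted collection_names (fun x => x) false
  let name_set := PySem.Set.ofList collection_names
  let r := building_ids.foldl (pvStepB sorted_names name_set) (PySem.Dict.empty, [])
  (r.1.items, r.2)

-- ===== PRECONDITION & SPEC =====
def Spec_select_building_collections_py (collection_names : List String) (building_ids : List String) (out : (List (String × String)) × List String) : Prop := out = select_building_collections_py_alt collection_names building_ids
instance (collection_names : List String) (building_ids : List String) (out : (List (String × String)) × List String) : Decidable (Spec_select_building_collections_py collection_names building_ids out) := by unfold Spec_select_building_collections_py; infer_instance

-- ===== CLAIM (what is proved, stated in full; the proofs are below) =====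
def Claim_equal_select_building_collections_py : Prop := ∀ (collection_names : List String) (building_ids : List String), Dom_select_building_collections_py collection_names building_ids → Spec_select_building_collections_py collection_names building_ids (select_building_collections_py collection_names building_ids)

-- ===== LEMMAS AND PROOFS =====

-- a list never lexicographically precedes its own prefix
theorem pv_not_lex_append (p t : List Char) : ¬ List.Lex (· < ·) (p ++ t) p := by
  induction p with
  | nil => simp
  | cons a p ih =>
    intro h
    rcases List.cons_lex_cons_iff.mp h with h | ⟨_, h⟩
    · exact lt_irrefl a h
    · exact ih h

theorem pv_lex_of_lt {l m : List Char} (h : l < m) : List.Lex (· < ·) l m := by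
  rw [← List.lt_iff_lex_lt]; exact h

theorem pv_lt_of_lex {l m : List Char} (h : List.Lex (· < ·) l m) : l < m := by
  rw [show (l < m) = List.lt l m from rfl, List.lt_iff_lex_lt]; exact h

-- a prefix is ≤ the whole string
theorem pv_prefix_le {p y : String} (h : PySem.Str.startswith y p = true) : p ≤ y := by
  rw [PySem.Str.startswith_eq] at h
  obtain ⟨t, ht⟩ := (PySem.Chars.startswith_iff _ _).mp h
  rw [← not_lt, String.lt_iff_toList_lt, ← ht]
  intro hlt
  exact pv_not_lex_append _ _ (pv_lex_of_lt hlt)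

-- strings with prefix p form an interval of the lexicographic order
theorem pv_chars_interval : ∀ (p z y : List Char), p <+: y →
    ¬ List.Lex (· < ·) z p → ¬ List.Lex (· < ·) y z → p <+: z := by
  intro p
  induction p with
  | nil => intro z y _ _ _; exact List.nil_prefix
  | cons a p ih =>
    intro z y hpre hzp hyz
    obtain ⟨t, ht⟩ := hpre
    cases z with
    | nil => exact absurd List.Lex.nil hzp
    | cons b zz =>
      subst ht
      have hba : ¬ b < a := fun hb => hzp (List.Lex.rel hb)
      have hab : ¬ a < b := fun hb => hyz (List.Lex.rel hb)
      have heq : a = b := le_antisymm (not_lt.mp hba) (not_lt.mp hab)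
      subst heq
      have h1 : ¬ List.Lex (· < ·) zz p := fun hl => hzp (List.Lex.cons hl)
      have h2 : ¬ List.Lex (· < ·) (p ++ t) zz := fun hl => hyz (List.Lex.cons hl)
      exact List.cons_prefix_cons.mpr ⟨rfl, ih zz (p ++ t) ⟨t, rfl⟩ h1 h2⟩

theorem pv_prefix_interval {p z y : String} (hy : PySem.Str.startswith y p = true)
    (h1 : p ≤ z) (h2 : z ≤ y) : PySem.Str.startswith z p = true := by
  rw [PySem.Str.startswith_eq] at hy ⊢
  rw [PySem.Chars.startswith_iff] at hy ⊢
  refine pv_chars_interval _ _ _ hy ?_ ?_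
  · intro hl
    exact absurd (String.lt_iff_toList_lt.mpr (pv_lt_of_lex hl)) (not_lt.mpr h1)
  · intro hl
    exact absurd (String.lt_iff_toList_lt.mpr (pv_lt_of_lex hl)) (not_lt.mpr h2)

theorem pv_startswith_refl (p : String) : PySem.Str.startswith p p = true := by
  rw [PySem.Str.startswith_eq, PySem.Chars.startswith_iff]

theorem pv_sorted_mono {xs : List String} (hs : xs.Pairwise (· ≤ ·)) :
    ∀ (i j : Nat) (hi : i < xs.length) (hj : j < xs.length), i ≤ j → xs[i] ≤ xs[j] := by
  intro i j hi hj hij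
  rcases Nat.lt_or_eq_of_le hij with h | h
  · exact List.pairwise_iff_getElem.mp hs i j hi hj h
  · subst h; exact le_refl _

-- bisectLeftLoop spec for String lists (PySem states it only for Int)
theorem pv_bisectLoop_spec (xs : List String) (x : String)
    (hs : xs.Pairwise (· ≤ ·)) :
    ∀ (fuel lo hi : Nat), lo ≤ hi → hi ≤ xs.length → hi - lo ≤ fuel →
    (∀ (j : Nat) (hj : j < xs.length), j < lo → xs[j] < x) →
    (∀ (j : Nat) (hj : j < xs.length), hi ≤ j → x ≤ xs[j]) →
    lo ≤ PySem.List.bisectLeftLoop xs x fuel lo hi ∧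
    PySem.List.bisectLeftLoop xs x fuel lo hi ≤ hi ∧
    (∀ (j : Nat) (hj : j < xs.length), j < PySem.List.bisectLeftLoop xs x fuel lo hi → xs[j] < x) ∧
    (∀ (j : Nat) (hj : j < xs.length), PySem.List.bisectLeftLoop xs x fuel lo hi ≤ j → x ≤ xs[j]) := by
  intro fuel
  induction fuel with
  | zero =>
    intro lo hi h1 h2 h3 hlo hhi
    have : lo = hi := by omega
    subst this
    simp only [PySem.List.bisectLeftLoop]
    exact ⟨le_refl _, le_refl _, hlo, hhi⟩
  | succ fuel ih =>
    intro lo hi h1 h2 h3 hlo hhi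
    by_cases hlh : lo < hi
    · have hmid : (lo + hi) / 2 < xs.length := by omega
      simp only [PySem.List.bisectLeftLoop, if_pos hlh, List.getElem?_eq_getElem hmid]
      by_cases hylt : xs[(lo + hi) / 2] < x
      · simp only [if_pos hylt]
        have hrec := ih ((lo + hi) / 2 + 1) hi (by omega) h2 (by omega)
          (fun j hj hjlt => by
            have : xs[j] ≤ xs[(lo + hi) / 2] := pv_sorted_mono hs j _ hj hmid (by omega)
            exact lt_of_le_of_lt this hylt)
          hhi
        exact ⟨by omega, hrec.2.1, hrec.2.2.1, hrec.2.2.2⟩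
      · simp only [if_neg hylt]
        have hrec := ih lo ((lo + hi) / 2) (by omega) (by omega) (by omega) hlo
          (fun j hj hjge => by
            have : xs[(lo + hi) / 2] ≤ xs[j] := pv_sorted_mono hs _ j hmid hj hjge
            exact le_trans (not_lt.mp hylt) this)
        exact ⟨hrec.1, by omega, hrec.2.2.1, hrec.2.2.2⟩
    · have : lo = hi := by omega
      subst this
      simp only [PySem.List.bisectLeftLoop, if_neg hlh]
      exact ⟨le_refl _, le_refl _, hlo, hhi⟩

theorem pv_bisect_spec (xs : List String) (x : String) (hs : xs.Pairwise (· ≤ ·)) :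
    PySem.List.bisectLeft xs x ≤ xs.length ∧
    (∀ (j : Nat) (hj : j < xs.length), j < PySem.List.bisectLeft xs x → xs[j] < x) ∧
    (∀ (j : Nat) (hj : j < xs.length), PySem.List.bisectLeft xs x ≤ j → x ≤ xs[j]) := by
  have h := pv_bisectLoop_spec xs x hs xs.length 0 xs.length (Nat.zero_le _) (le_refl _)
    (by omega) (fun j hj hlt => by omega) (fun j hj hge => by omega)
  exact ⟨h.2.1, h.2.2.1, h.2.2.2⟩

-- the two loop bodies agree on every building id and state
theorem pv_step_eq (collection_names : List String) (building_id : String)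
    (st : PySem.Dict String String × List String) :
    pvStepA collection_names st building_id =
    pvStepB (PySem.List.sorted collection_names (fun x => x) false)
      (PySem.Set.ofList collection_names) st building_id := by
  unfold pvStepA pvStepB
  dsimp only
  set P := "building_" ++ building_id with hP
  set M := collection_names.filter (fun name => PySem.Str.startswith name P) with hM
  set C := PySem.List.sorted M (fun x => x) false with hC
  set S := PySem.List.sorted collection_names (fun x => x) false with hS
  have hSp : S.Pairwise (· ≤ ·) := PySem.List.sorted_pairwise collection_names (fun x => x)
  by_cases hmem : P ∈ collection_names
  · -- exact name exists: both sides map building_id to it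
    have hcont : PySem.Set.contains (PySem.Set.ofList collection_names) P = true := by
      simp [PySem.Set.contains, PySem.Set.mem_ofList, hmem]
    rw [if_pos hcont]
    have hPM : P ∈ M := by
      rw [hM, List.mem_filter]
      exact ⟨hmem, pv_startswith_refl P⟩
    have hPC : P ∈ C := (PySem.List.mem_sorted M _ false P).mpr hPM
    cases hc : C with
    | nil => rw [hc] at hPC; simp at hPC
    | cons c0 rest =>
      rw [hc] at hPC
      have hPmem := List.mem_cons.mp hPC
      simp [hPmem]
  · -- no exact name
    have hcont : PySem.Set.contains (PySem.Set.ofList collection_names) P = false := by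
      simp [PySem.Set.contains, PySem.Set.mem_ofList, hmem]
    rw [hcont]
    simp only [Bool.false_eq_true, if_false]
    cases hc : C with
    | nil =>
      -- no candidate at all: B's probed element cannot match either
      have hMnil : M = [] := (PySem.List.sorted_eq_nil_iff M _ false).mp hc
      have hbr : ∀ c, S[PySem.List.bisectLeft S P]? = some c → PySem.Str.startswith c P = false := by
        intro c hsome
        have hcS : c ∈ S := List.mem_of_getElem? hsome
        have hccn : c ∈ collection_names := (PySem.List.mem_sorted _ _ _ _).mp hcS
        by_contra hsw
        have hcM : c ∈ M := by
          rw [hM, List.mem_filter]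
          exact ⟨hccn, by simpa using hsw⟩
        rw [hMnil] at hcM
        simp at hcM
      cases hgs : S[PySem.List.bisectLeft S P]? with
      | none => rfl
      | some c =>
        have hf := hbr c hgs
        rw [PySem.Str.startswith_eq] at hf
        simp [hf]
    | cons c0 rest =>
      -- candidates exist: B's bisect finds exactly the smallest candidate c0
      have hc0C : c0 ∈ C := by rw [hc]; exact List.mem_cons_self
      have hc0M : c0 ∈ M := (PySem.List.mem_sorted M _ false c0).mp hc0C
      have hc0cn : c0 ∈ collection_names := (List.mem_filter.mp (hM ▸ hc0M)).1
      have hc0sw : PySem.Str.startswith c0 P = true := by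
        have := (List.mem_filter.mp (hM ▸ hc0M)).2
        simpa using this
      have hmin : ∀ y ∈ M, c0 ≤ y := by
        have := PySem.List.key_head_sorted_le M (fun x => x) (hC ▸ hc)
        simpa using this
      have hPc0 : P ≤ c0 := pv_prefix_le hc0sw
      obtain ⟨hle, hlt, hge⟩ := pv_bisect_spec S P hSp
      set i := PySem.List.bisectLeft S P with hi
      have hc0S : c0 ∈ S := (PySem.List.mem_sorted _ _ _ _).mpr hc0cn
      obtain ⟨j, hj, hSj⟩ := List.mem_iff_getElem.mp hc0S
      have hij : i ≤ j := by
        by_contra h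
        have := hlt j hj (by omega)
        rw [hSj] at this
        exact absurd hPc0 (not_le.mpr this)
      have hilen : i < S.length := lt_of_le_of_lt hij hj
      have hPSi : P ≤ S[i] := hge i hilen (le_refl _)
      have hSile : S[i] ≤ c0 := by
        have := pv_sorted_mono hSp i j hilen hj hij
        rwa [hSj] at this
      have hsw : PySem.Str.startswith S[i] P = true := pv_prefix_interval hc0sw hPSi hSile
      have hSiM : S[i] ∈ M := by
        rw [hM, List.mem_filter]
        exact ⟨(PySem.List.mem_sorted _ _ _ _).mp (List.getElem_mem hilen), by simpa using hsw⟩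
      have hSic0 : S[i] = c0 := le_antisymm hSile (hmin _ hSiM)
      -- A side: the exact name is not a candidate
      have hPnot : ¬ (P = c0 ∨ P ∈ rest) := by
        intro h
        have hPC : P ∈ C := by rw [hc]; exact List.mem_cons.mpr h
        have hPM : P ∈ M := (PySem.List.mem_sorted M _ false P).mp hPC
        exact hmem (List.mem_filter.mp (hM ▸ hPM)).1
      have hsw2 : PySem.Chars.startswith c0.toList P.toList = true := by
        rw [← PySem.Str.startswith_eq, ← hSic0]; exact hsw
      rw [List.getElem?_eq_getElem hilen]
      simp [hPnot, hsw2, hSic0]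

-- ===== VERDICT (by name: the statement is the Claim_ definition above) =====
theorem select_building_collections_py_spec : Claim_equal_select_building_collections_py := by
  intro collection_names building_ids _
  unfold Spec_select_building_collections_py
  unfold select_building_collections_py select_building_collections_py_alt
  have h : pvStepA collection_names =
      pvStepB (PySem.List.sorted collection_names (fun x => x) false)
        (PySem.Set.ofList collection_names) := by
    funext st b
    exact pv_step_eq collection_names b st
  rw [h]
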